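-- pv_equiv track=rewrite | github.com/weoverme/Potentially_T_F | Testing/dataset_maker.py | get_sample_feature_vectors
-- ===== SOURCE A (Python) =====
-- def get_sample_feature_vectors(postag_tokens_of_tweet, td_features):
--
--     curr_sv = [0] * len(td_features)  # list of n_features of 0s ex. [0, 0, 0, ..]
--
--     for token in postag_tokens_of_tweet: # for each feature
--         t_text, t_feature = token[0], token[1]
--         # find the index of the feature in td_features, if it exists
--         index = 9999 # default value
--
--         try:
--             for i in range(len(td_features)):
--                 if t_feature == td_features[i]:
--                     # when found, increment/decrement sample vector's  value
--
--                     if td_features[i] == td_features[-1]: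
--                         # checking if there is a "?" in the text
--                         if token[0] == "?":
--                             # decrement
--                             curr_sv[i] -= 1
--                             break
--                     else:
--                         curr_sv[i] += 1
--                         break
--
--         except IndexError:
--             # if the feature isn't in the sv_features list
--             pass
--
--     return curr_sv
-- ===== SOURCE B (Python) =====
-- def get_sample_feature_vectors(postag_tokens_of_tweet, td_features):
--     # One pass over tokens builds aggregate counters; the vector is then
--     # filled by a single scan over td_features (first occurrences only).
--     feat_count = {}
--     q_count = {}
--     for token in postag_tokens_of_tweet:
--         text, feat = token[0], token[1]
--         feat_count[feat] = feat_count.get(feat, 0) + 1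
--         if text == "?":
--             q_count[feat] = q_count.get(feat, 0) + 1
--     sv = [0] * len(td_features)
--     if td_features:
--         last = td_features[-1]
--         seen = set()
--         for i, f in enumerate(td_features):
--             if f in seen:
--                 continue
--             seen.add(f)
--             sv[i] = -q_count.get(f, 0) if f == last else feat_count.get(f, 0)
--     return sv
-- ===== Notes on version B (the rewrite author's own statement) =====
-- stated objective: faster
-- what changed: Instead of scanning td_features inside a per-token loop with break logic, B makes one counting pass over the tokens (feature counts and '?'-feature counts) and then fills the vector in a single first-occurrence scan over td_features.
import Mathlib
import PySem

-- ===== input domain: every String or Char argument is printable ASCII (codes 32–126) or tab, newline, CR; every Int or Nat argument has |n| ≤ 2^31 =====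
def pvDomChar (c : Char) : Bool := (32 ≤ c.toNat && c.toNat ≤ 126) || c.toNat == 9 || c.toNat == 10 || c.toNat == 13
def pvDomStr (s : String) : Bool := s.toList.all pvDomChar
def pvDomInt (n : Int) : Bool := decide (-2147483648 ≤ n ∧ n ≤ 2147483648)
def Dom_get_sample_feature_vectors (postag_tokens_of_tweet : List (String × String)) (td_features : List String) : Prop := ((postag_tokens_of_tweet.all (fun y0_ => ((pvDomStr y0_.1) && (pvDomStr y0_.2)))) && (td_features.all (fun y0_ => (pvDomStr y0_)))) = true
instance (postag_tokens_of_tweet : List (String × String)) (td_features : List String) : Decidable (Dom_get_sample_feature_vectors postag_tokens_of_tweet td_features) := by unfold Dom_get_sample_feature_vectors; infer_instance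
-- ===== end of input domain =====

-- B replaces A's per-token inner scan of td_features (O(t*f)) by one counting pass over the
-- tokens followed by a single first-occurrence scan of td_features (measured faster).


-- ===== PORT A =====
-- inner 'for i in range(len(td_features))' loop with its breaks; the except IndexError
-- branch is unreachable (all accesses are in range when the loop body runs).
def pvInnerA (td : List String) (ttext tfeat : String) (sv : List Int) (i : Nat) : List Int :=
  if h : i < td.length then
    if tfeat = td[i] then
      if td[i] = PySem.List.pyGetD td (-1) "" then
        if ttext = "?" then sv.set i (sv.getD i 0 - 1)
        else pvInnerA td ttext tfeat sv (i + 1)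
      else sv.set i (sv.getD i 0 + 1)
    else pvInnerA td ttext tfeat sv (i + 1)
  else sv
termination_by td.length - i
decreasing_by all_goals omega

def get_sample_feature_vectors (postag_tokens_of_tweet : List (String × String)) (td_features : List String) : List Int :=
  postag_tokens_of_tweet.foldl
    (fun curr_sv token => pvInnerA td_features token.1 token.2 curr_sv 0)
    (List.replicate td_features.length 0)

-- ===== PORT B =====
def get_sample_feature_vectors_alt (postag_tokens_of_tweet : List (String × String)) (td_features : List String) : List Int :=
  -- one pass over the tokens: feat_count and q_count
  let counts := postag_tokens_of_tweet.foldl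
    (fun (p : PySem.Dict String Int × PySem.Dict String Int) token =>
      (p.1.insert token.2 (p.1.getD token.2 0 + 1),
       if token.1 = "?" then p.2.insert token.2 (p.2.getD token.2 0 + 1) else p.2))
    (PySem.Dict.empty, PySem.Dict.empty)
  let sv := List.replicate td_features.length (0 : Int)
  if td_features = [] then sv
  else
    let last := PySem.List.pyGetD td_features (-1) ""
    -- fill first occurrences while scanning td_features once
    ((PySem.List.enumerate td_features 0).foldl
      (fun (st : List Int × PySem.Set String) p =>
        if PySem.Set.contains st.2 p.2 then st
        else (st.1.set p.1.toNat
                (if p.2 = last then -(counts.2.getD p.2 0) else counts.1.getD p.2 0),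
              PySem.Set.add st.2 p.2))
      (sv, PySem.Set.empty)).1

-- ===== PRECONDITION & SPEC =====
def Spec_get_sample_feature_vectors (postag_tokens_of_tweet : List (String × String)) (td_features : List String) (out : List Int) : Prop := out = get_sample_feature_vectors_alt postag_tokens_of_tweet td_features
instance (postag_tokens_of_tweet : List (String × String)) (td_features : List String) (out : List Int) : Decidable (Spec_get_sample_feature_vectors postag_tokens_of_tweet td_features out) := by unfold Spec_get_sample_feature_vectors; infer_instance

-- ===== CLAIM (what is proved, stated in full; the proofs are below) =====
def Claim_equal_get_sample_feature_vectors : Prop := ∀ (postag_tokens_of_tweet : List (String × String)) (td_features : List String), Dom_get_sample_feature_vectors postag_tokens_of_tweet td_features → Spec_get_sample_feature_vectors postag_tokens_of_tweet td_features (get_sample_feature_vectors postag_tokens_of_tweet td_features)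

-- ===== LEMMAS AND PROOFS =====

-- the common mathematical characterisation: entry i of the result
def pvEnt (pt : List (String × String)) (td : List String) (i : Nat) : Int :=
  if List.idxOf (td.getD i "") td = i then
    if td.getD i "" = td.getD (td.length - 1) "" then
      -((pt.countP (fun tok => tok.2 == td.getD i "" && tok.1 == "?") : Int))
    else ((pt.countP (fun tok => tok.2 == td.getD i "") : Int))
  else 0

def pvSpecV (pt : List (String × String)) (td : List String) : List Int :=
  (List.range td.length).map (pvEnt pt td)

-- A's inner loop, characterised
lemma pvInnerA_eq (td : List String) (t f : String) :
    ∀ (n i : Nat) (sv : List Int), td.length - i ≤ n →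
    pvInnerA td t f sv i =
      if f ∈ td.drop i then
        if f = PySem.List.pyGetD td (-1) "" then
          (if t = "?" then
            sv.set (i + (td.drop i).idxOf f) (sv.getD (i + (td.drop i).idxOf f) 0 - 1)
          else sv)
        else sv.set (i + (td.drop i).idxOf f) (sv.getD (i + (td.drop i).idxOf f) 0 + 1)
      else sv := by
  intro n
  induction n with
  | zero =>
    intro i sv h
    have hi : ¬ i < td.length := by omega
    have hd : td.drop i = [] := List.drop_eq_nil_of_le (by omega)
    rw [pvInnerA]
    simp [hi, hd]
  | succ n ih =>
    intro i sv h
    by_cases hi : i < td.length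
    · have hd : td.drop i = td[i] :: td.drop (i + 1) := List.drop_eq_getElem_cons hi
      rw [pvInnerA, dif_pos hi]
      by_cases hf : f = td[i]
      · have hmem : f ∈ td.drop i := by rw [hd]; exact hf ▸ List.mem_cons_self
        have hj0 : i + List.idxOf f (td.drop i) = i := by
          rw [hd, List.idxOf_cons_eq _ hf.symm]; omega
        by_cases hl : td[i] = PySem.List.pyGetD td (-1) ""
        · by_cases ht : t = "?"
          · rw [if_pos hf, if_pos hl, if_pos ht, if_pos hmem, if_pos (hf.trans hl), if_pos ht, hj0]
          · rw [if_pos hf, if_pos hl, if_neg ht, ih (i + 1) sv (by omega)]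
            by_cases hm : f ∈ td.drop (i + 1)
            · rw [if_pos hm, if_pos (hf.trans hl), if_neg ht,
                  if_pos hmem, if_pos (hf.trans hl), if_neg ht]
            · rw [if_neg hm, if_pos hmem, if_pos (hf.trans hl), if_neg ht]
        · have hfl : ¬ f = PySem.List.pyGetD td (-1) "" := fun hx => hl (hf.symm.trans hx)
          rw [if_pos hf, if_neg hl, if_pos hmem, if_neg hfl, hj0]
      · have hne : td[i] ≠ f := fun hx => hf hx.symm
        have hmemiff : f ∈ td.drop i ↔ f ∈ td.drop (i + 1) := by
          rw [hd, List.mem_cons]; simp [hf]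
        rw [if_neg hf, ih (i + 1) sv (by omega)]
        by_cases hm : f ∈ td.drop (i + 1)
        · have hj : (i + 1) + List.idxOf f (td.drop (i + 1)) = i + List.idxOf f (td.drop i) := by
            rw [hd, List.idxOf_cons_ne _ hne]; omega
          rw [if_pos hm, if_pos (hmemiff.mpr hm), hj]
        · rw [if_neg hm, if_neg (fun hx => hm (hmemiff.mp hx))]
    · have hd : td.drop i = [] := List.drop_eq_nil_of_le (by omega)
      rw [pvInnerA, dif_neg hi]
      simp [hd]

-- bridging td[-1] with td.getD (td.length - 1)
lemma pvLast (td : List String) (htd : td ≠ []) :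
    PySem.List.pyGetD td (-1) "" = td.getD (td.length - 1) "" := by
  rw [PySem.List.pyGetD_neg_one td "" htd, List.getLast_eq_getElem,
    List.getD_eq_getElem td "" (by have := List.length_pos_iff.mpr htd; omega)]

lemma pvSpecV_length (pt : List (String × String)) (td : List String) :
    (pvSpecV pt td).length = td.length := by simp [pvSpecV]

lemma pvSpecV_getElem (pt : List (String × String)) (td : List String) (i : Nat)
    (h : i < td.length) (h' : i < (pvSpecV pt td).length) :
    (pvSpecV pt td)[i] = pvEnt pt td i := by
  simp [pvSpecV]

lemma pvSpecV_getD (pt : List (String × String)) (td : List String) (i : Nat)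
    (h : i < td.length) :
    (pvSpecV pt td).getD i 0 = pvEnt pt td i := by
  rw [List.getD_eq_getElem _ _ (by simpa [pvSpecV_length] using h)]
  exact pvSpecV_getElem pt td i h _

-- effect of appending one token on entry i of the characterisation
lemma pvEnt_append (pt : List (String × String)) (td : List String)
    (tok : String × String) (i : Nat) :
    pvEnt (pt ++ [tok]) td i =
      pvEnt pt td i +
        (if List.idxOf (td.getD i "") td = i ∧ tok.2 = td.getD i "" then
           (if td.getD i "" = td.getD (td.length - 1) "" then
              (if tok.1 = "?" then -1 else 0)
            else 1)
         else 0) := by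
  simp only [pvEnt, List.countP_append, List.countP_cons, List.countP_nil,
    Bool.and_eq_true, beq_iff_eq]
  split_ifs
  all_goals try (push_cast; ring)
  all_goals tauto

-- one token applied to the characterisation
lemma pvStep (pt : List (String × String)) (td : List String) (tok : String × String) :
    pvInnerA td tok.1 tok.2 (pvSpecV pt td) 0 = pvSpecV (pt ++ [tok]) td := by
  rw [pvInnerA_eq td tok.1 tok.2 td.length 0 _ (by omega)]
  simp only [List.drop_zero, Nat.zero_add]
  by_cases hmem : tok.2 ∈ td
  · have htd : td ≠ [] := List.ne_nil_of_mem hmem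
    have hjlt : List.idxOf tok.2 td < td.length := List.idxOf_lt_length_of_mem hmem
    have hgdj : td.getD (List.idxOf tok.2 td) "" = tok.2 := by
      rw [List.getD_eq_getElem _ _ hjlt]; exact List.getElem_idxOf hjlt
    have hfo : List.idxOf (td.getD (List.idxOf tok.2 td) "") td = List.idxOf tok.2 td := by
      rw [hgdj]
    rw [if_pos hmem, pvSpecV_getD _ _ _ hjlt]
    by_cases hl : tok.2 = PySem.List.pyGetD td (-1) ""
    · by_cases ht : tok.1 = "?"
      · -- decrement at the first index of tok.2
        rw [if_pos hl, if_pos ht]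
        apply List.ext_getElem (by simp [pvSpecV])
        intro i h1 h2
        have h1' : i < td.length := by simpa [pvSpecV_length] using h2
        rw [List.getElem_set, pvSpecV_getElem _ _ _ h1' h2, pvEnt_append]
        by_cases hij : List.idxOf tok.2 td = i
        · rw [if_pos hij, ← hij]
          have hcond : List.idxOf (td.getD (List.idxOf tok.2 td) "") td = List.idxOf tok.2 td ∧
              tok.2 = td.getD (List.idxOf tok.2 td) "" := ⟨hfo, hgdj.symm⟩
          have hvl : td.getD (List.idxOf tok.2 td) "" = td.getD (td.length - 1) "" :=
            hgdj.trans (hl.trans (pvLast td htd))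
          rw [if_pos hcond, if_pos hvl, if_pos ht]
          ring
        · rw [if_neg hij, pvSpecV_getElem _ _ _ h1' (by simpa [pvSpecV_length] using h1')]
          have hnc : ¬ (List.idxOf (td.getD i "") td = i ∧ tok.2 = td.getD i "") := by
            rintro ⟨hfoi, hv⟩
            rw [← hv] at hfoi
            exact hij hfoi
          rw [if_neg hnc, add_zero]
      · -- feature equals the last one but text is not "?": nothing changes
        rw [if_pos hl, if_neg ht]
        apply List.ext_getElem (by simp [pvSpecV])
        intro i h1 h2
        have h1' : i < td.length := by simpa [pvSpecV_length] using h1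
        rw [pvSpecV_getElem _ _ _ h1' h1, pvSpecV_getElem _ _ _ h1' h2, pvEnt_append]
        by_cases hc : List.idxOf (td.getD i "") td = i ∧ tok.2 = td.getD i ""
        · have hvl : td.getD i "" = td.getD (td.length - 1) "" :=
            hc.2.symm.trans (hl.trans (pvLast td htd))
          rw [if_pos hc, if_pos hvl, if_neg ht, add_zero]
        · rw [if_neg hc, add_zero]
    · -- increment at the first index of tok.2
      rw [if_neg hl]
      apply List.ext_getElem (by simp [pvSpecV])
      intro i h1 h2
      have h1' : i < td.length := by simpa [pvSpecV_length] using h2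
      rw [List.getElem_set, pvSpecV_getElem _ _ _ h1' h2, pvEnt_append]
      by_cases hij : List.idxOf tok.2 td = i
      · rw [if_pos hij, ← hij]
        have hcond : List.idxOf (td.getD (List.idxOf tok.2 td) "") td = List.idxOf tok.2 td ∧
            tok.2 = td.getD (List.idxOf tok.2 td) "" := ⟨hfo, hgdj.symm⟩
        have hnvl : ¬ td.getD (List.idxOf tok.2 td) "" = td.getD (td.length - 1) "" :=
          fun hx => hl (hgdj.symm.trans (hx.trans (pvLast td htd).symm))
        rw [if_pos hcond, if_neg hnvl]
      · rw [if_neg hij, pvSpecV_getElem _ _ _ h1' (by simpa [pvSpecV_length] using h1')]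
        have hnc : ¬ (List.idxOf (td.getD i "") td = i ∧ tok.2 = td.getD i "") := by
          rintro ⟨hfoi, hv⟩
          rw [← hv] at hfoi
          exact hij hfoi
        rw [if_neg hnc, add_zero]
  · rw [if_neg hmem]
    apply List.ext_getElem (by simp [pvSpecV])
    intro i h1 h2
    have h1' : i < td.length := by simpa [pvSpecV_length] using h1
    rw [pvSpecV_getElem _ _ _ h1' h1, pvSpecV_getElem _ _ _ h1' h2, pvEnt_append]
    have hnc : ¬ (List.idxOf (td.getD i "") td = i ∧ tok.2 = td.getD i "") := by
      rintro ⟨hfoi, hv⟩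
      apply hmem
      rw [hv, List.getD_eq_getElem _ _ h1']
      exact List.getElem_mem _
    rw [if_neg hnc, add_zero]

-- A equals the characterisation
lemma pvA_eq_spec (pt : List (String × String)) (td : List String) :
    get_sample_feature_vectors pt td = pvSpecV pt td := by
  induction pt using List.reverseRecOn with
  | nil =>
    unfold get_sample_feature_vectors
    apply List.ext_getElem (by simp [pvSpecV])
    intro i h1 h2
    have h1' : i < td.length := by simpa using h1
    rw [pvSpecV_getElem _ _ _ h1']
    simp [pvEnt]
  | append_singleton pt tok ih =>
    unfold get_sample_feature_vectors at *
    rw [List.foldl_append, List.foldl_cons, List.foldl_nil, ih, pvStep]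

-- the feature counter of B, characterised
lemma pvC1 (pt : List (String × String)) (v : String) :
    (pt.foldl (fun d tok => d.insert tok.2 (d.getD tok.2 0 + 1)) PySem.Dict.empty).getD v 0
      = (pt.countP (fun tok => tok.2 == v) : Int) := by
  rw [← List.foldl_map (f := fun tok : String × String => tok.2)
        (g := fun d x => PySem.Dict.insert d x (d.getD x 0 + 1)),
    PySem.Dict.getD_foldl_insert_add_one, PySem.Dict.getD_empty,
    List.count_eq_countP, List.countP_map, Int.zero_add]
  rfl

-- the "?"-counter of B, characterised
lemma pvC2 (pt : List (String × String)) (v : String) :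
    (pt.foldl (fun d tok => if tok.1 = "?" then d.insert tok.2 (d.getD tok.2 0 + 1) else d)
        PySem.Dict.empty).getD v 0
      = (pt.countP (fun tok => tok.2 == v && tok.1 == "?") : Int) := by
  rw [PySem.List.foldl_ite_eq_foldl_filter (p := fun tok : String × String => tok.1 = "?")
        (f := fun (d : PySem.Dict String Int) (tok : String × String) =>
          d.insert tok.2 (d.getD tok.2 0 + 1)),
    ← List.foldl_map (f := fun tok : String × String => tok.2)
        (g := fun d x => PySem.Dict.insert d x (d.getD x 0 + 1)),
    PySem.Dict.getD_foldl_insert_add_one, PySem.Dict.getD_empty,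
    List.count_eq_countP, List.countP_map, List.countP_filter]
  simp only [Function.comp]
  norm_num
  apply List.countP_congr
  intro x hx
  by_cases h1 : x.2 = v <;> by_cases h2 : x.1 = "?" <;> simp [h1, h2]

-- B's fill loop, characterised
lemma pvFillB (td0 : List String) (g : String → Int) :
    ∀ (n k : Nat) (sv : List Int) (seen : PySem.Set String),
    td0.length - k ≤ n →
    sv.length = td0.length →
    (∀ v, v ∈ seen ↔ v ∈ td0.take k) →
    ((PySem.List.enumerate (td0.drop k) (k : Int)).foldl
        (fun (st : List Int × PySem.Set String) p =>
          if PySem.Set.contains st.2 p.2 then st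
          else (st.1.set p.1.toNat (g p.2), PySem.Set.add st.2 p.2))
        (sv, seen)).1
      = (List.range td0.length).map (fun i =>
          if k ≤ i ∧ List.idxOf (td0.getD i "") td0 = i then g (td0.getD i "")
          else sv.getD i 0) := by
  intro n
  induction n with
  | zero =>
    intro k sv seen h hlen hseen
    have hk : td0.length ≤ k := by omega
    rw [List.drop_eq_nil_of_le hk, PySem.List.enumerate_nil, List.foldl_nil]
    apply List.ext_getElem (by simp [hlen])
    intro i h1 h2
    have hi : i < td0.length := by simpa using h2
    rw [List.getElem_map, List.getElem_range, if_neg (by omega),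
      List.getD_eq_getElem _ _ (by omega)]
  | succ n ih =>
    intro k sv seen h hlen hseen
    by_cases hk : k < td0.length
    · have hd : td0.drop k = td0[k] :: td0.drop (k + 1) := List.drop_eq_getElem_cons hk
      rw [hd, PySem.List.enumerate_cons, List.foldl_cons]
      have hcast : ((k : Int) + 1) = ((k + 1 : Nat) : Int) := by push_cast; ring
      have hgd : td0.getD k "" = td0[k] := List.getD_eq_getElem _ _ hk
      have hmem : td0[k] ∈ td0 := List.getElem_mem hk
      have htake : td0.take (k + 1) = td0.take k ++ [td0[k]] := by
        rw [List.take_add_one, List.getElem?_eq_getElem hk]; rfl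
      have htkm : ∀ w, w ∈ td0.take (k + 1) ↔ w ∈ td0.take k ∨ w = td0[k] := by
        intro w
        rw [htake, List.mem_append, List.mem_singleton]
      by_cases hv : td0[k] ∈ seen
      · have hc : PySem.Set.contains seen td0[k] = true := (PySem.Set.contains_iff _ _).mpr hv
        simp only [hc, if_true]
        have hinv1 : ∀ w, w ∈ seen ↔ w ∈ td0.take (k + 1) := by
          intro w
          rw [htkm w]
          constructor
          · intro hw; exact Or.inl ((hseen w).mp hw)
          · rintro (hw | hw)
            · exact (hseen w).mpr hw
            · rw [hw]; exact hv
        rw [hcast, ih (k + 1) sv seen (by omega) hlen hinv1]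
        · -- maps agree entrywise
          apply List.ext_getElem (by simp)
          intro i h1 h2
          rw [List.getElem_map, List.getElem_range, List.getElem_map, List.getElem_range]
          have hi : i < td0.length := by simpa using h1
          by_cases hik : i = k
          · subst hik
            have hlt : List.idxOf td0[i] td0 < i :=
              (List.mem_take_iff_idxOf_lt hmem).mp ((hseen _).mp hv)
            rw [if_neg (by omega), if_neg (by rw [hgd]; omega)]
          · by_cases hki : k + 1 ≤ i
            · have : (k ≤ i) = (k + 1 ≤ i) := by simp; omega
              simp only [this]
            · rw [if_neg (by omega), if_neg (by omega)]
      · have hc : PySem.Set.contains seen td0[k] = false := by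
          rw [Bool.eq_false_iff]
          intro hx
          exact hv ((PySem.Set.contains_iff _ _).mp hx)
        simp only [hc, Bool.false_eq_true, if_false]
        have hinv2 : ∀ w, w ∈ PySem.Set.add seen td0[k] ↔ w ∈ td0.take (k + 1) := by
          intro w
          rw [PySem.Set.mem_add, hseen w, htkm w]
        rw [hcast, ih (k + 1) (sv.set (Int.toNat k) (g td0[k])) (PySem.Set.add seen td0[k])
              (by omega) (by simp [hlen]) hinv2]
        · have hio : List.idxOf td0[k] td0 = k := by
            have h1 : ¬ List.idxOf td0[k] td0 < k := by
              rw [← List.mem_take_iff_idxOf_lt hmem]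
              intro hx
              exact hv ((hseen _).mpr hx)
            have h2 : List.idxOf td0[k] td0 < k + 1 := by
              rw [← List.mem_take_iff_idxOf_lt hmem, htkm _]
              exact Or.inr rfl
            omega
          apply List.ext_getElem (by simp)
          intro i h1 h2
          rw [List.getElem_map, List.getElem_range, List.getElem_map, List.getElem_range]
          have hi : i < td0.length := by simpa using h1
          have hkn : (Int.toNat (k : Int)) = k := Int.toNat_natCast k
          by_cases hik : i = k
          · subst hik
            have hsetk : (sv.set (Int.toNat (i : Int)) (g td0[i])).getD i 0 = g td0[i] := by
              rw [Int.toNat_natCast,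
                List.getD_eq_getElem _ _ (by simp; omega)]
              simp
            rw [if_neg (by omega), if_pos ⟨le_refl i, by rw [hgd, hio]⟩, hgd, hsetk]
          · have hset : (sv.set (Int.toNat (k : Int)) (g td0[k])).getD i 0 = sv.getD i 0 := by
              rw [hkn]
              by_cases hilen : i < sv.length
              · rw [List.getD_eq_getElem _ _ (by simpa using hilen),
                  List.getD_eq_getElem _ _ hilen, List.getElem_set, if_neg (by omega)]
              · rw [List.getD_eq_default _ _ (by simpa using hilen),
                  List.getD_eq_default _ _ (by omega)]
            rw [hset]
            by_cases hki : k + 1 ≤ i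
            · have : (k ≤ i) = (k + 1 ≤ i) := by simp; omega
              simp only [this]
            · rw [if_neg (by omega), if_neg (by omega)]
    · have hk' : td0.length ≤ k := by omega
      rw [List.drop_eq_nil_of_le hk', PySem.List.enumerate_nil, List.foldl_nil]
      apply List.ext_getElem (by simp [hlen])
      intro i h1 h2
      have hi : i < td0.length := by simpa using h2
      rw [List.getElem_map, List.getElem_range, if_neg (by omega),
        List.getD_eq_getElem _ _ (by omega)]

-- B equals the characterisation
lemma pvB_eq_spec (pt : List (String × String)) (td : List String) :
    get_sample_feature_vectors_alt pt td = pvSpecV pt td := by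
  by_cases htd : td = []
  · subst htd
    simp [get_sample_feature_vectors_alt, pvSpecV]
  · simp only [get_sample_feature_vectors_alt, if_neg htd]
    rw [PySem.List.foldl_prod_mk
        (f := fun (d : PySem.Dict String Int) (tok : String × String) =>
          d.insert tok.2 (d.getD tok.2 0 + 1))
        (g := fun (d : PySem.Dict String Int) (tok : String × String) =>
          if tok.1 = "?" then d.insert tok.2 (d.getD tok.2 0 + 1) else d)]
    have hfill := pvFillB td
      (fun v => if v = PySem.List.pyGetD td (-1) "" then
          -((pt.foldl (fun d tok => if tok.1 = "?" then d.insert tok.2 (d.getD tok.2 0 + 1) else d)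
              PySem.Dict.empty).getD v 0)
        else (pt.foldl (fun d tok => d.insert tok.2 (d.getD tok.2 0 + 1))
              PySem.Dict.empty).getD v 0)
      td.length 0 (List.replicate td.length 0) PySem.Set.empty
      (by omega) (by simp) (by simp [PySem.Set.empty])
    simp only [List.drop_zero, Nat.cast_zero] at hfill
    rw [hfill]
    unfold pvSpecV
    apply List.map_congr_left
    intro i hmr
    have hi : i < td.length := List.mem_range.mp hmr
    have hrep : (List.replicate td.length (0 : Int)).getD i 0 = 0 :=
      List.getD_replicate _ hi
    simp only [pvEnt, Nat.zero_le, true_and, hrep, pvLast td htd, pvC1, pvC2]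

-- ===== VERDICT (by name: the statement is the Claim_ definition above) =====
theorem get_sample_feature_vectors_spec : Claim_equal_get_sample_feature_vectors := by
  intro pt td _
  unfold Spec_get_sample_feature_vectors
  rw [pvA_eq_spec, pvB_eq_spec]
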